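-- pv_equiv track=rewrite | github.com/Esemudje/Jay-ECE-480-Project- | confusion_matrices_Kmeans.py | count_lines_per_block
-- ===== SOURCE A (Python) =====
-- def count_lines_per_block(lines):
--     block_counts = []
--     current_block_count = 0
--
--     for line in lines:
--         if line.strip():  # If not a blank line
--             current_block_count += 1
--         else:
--             if current_block_count > 0:
--                 block_counts.append(current_block_count)
--                 current_block_count = 0  # Reset for next block
--
--     if current_block_count > 0:
--         block_counts.append(current_block_count)
--
--     return block_counts
-- ===== SOURCE B (Python) =====
-- def count_lines_per_block(lines):
--     counts = []
--     i, n = 0, len(lines)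
--     while i < n:
--         if lines[i].strip():
--             j = i
--             while j < n and lines[j].strip():
--                 j += 1
--             counts.append(j - i)
--             i = j
--         else:
--             i += 1
--     return counts
-- ===== Notes on version B (the rewrite author's own statement) =====
-- stated objective: alternative
-- what changed: Replaced the running-counter/flush state machine with a two-pointer run scanner: on each non-blank line it scans ahead to the end of that maximal non-blank run, appends the run length j-i, and jumps past it; no accumulator, reset or end-of-loop flush remains.
import Mathlib
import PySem

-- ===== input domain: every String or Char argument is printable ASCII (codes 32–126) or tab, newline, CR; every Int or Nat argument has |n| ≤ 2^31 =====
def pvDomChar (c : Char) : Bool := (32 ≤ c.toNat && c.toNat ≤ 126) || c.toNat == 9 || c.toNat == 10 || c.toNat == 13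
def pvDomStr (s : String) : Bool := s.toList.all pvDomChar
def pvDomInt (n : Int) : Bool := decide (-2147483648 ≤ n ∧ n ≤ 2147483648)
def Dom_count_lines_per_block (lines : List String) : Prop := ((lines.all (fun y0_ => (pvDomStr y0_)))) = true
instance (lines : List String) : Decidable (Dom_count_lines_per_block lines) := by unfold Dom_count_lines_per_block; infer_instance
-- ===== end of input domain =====

-- B replaces A's running-counter/flush state machine with a two-pointer run scanner
-- (scan each maximal non-blank run, emit its length, jump past it); alternative, same cost.


-- truthiness of line.strip(): the stripped line is non-empty
def pvNonBlank (l : String) : Bool := PySem.Str.strip l != ""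

-- ===== PORT A =====
-- the for-loop with state (block_counts, current_block_count), then the final flush
def countA_go (acc : List Int) (cur : Int) : List String → List Int
  | [] => if cur > 0 then acc ++ [cur] else acc
  | l :: rest =>
    if pvNonBlank l then countA_go acc (cur + 1) rest
    else if cur > 0 then countA_go (acc ++ [cur]) 0 rest
    else countA_go acc cur rest

def count_lines_per_block (lines : List String) : List Int :=
  countA_go [] 0 lines

-- ===== PORT B =====
-- two-pointer run scanner: at a non-blank line, the inner while-loop scan is the
-- maximal non-blank run (takeWhile); emit its length and jump past it (dropWhile)
def count_lines_per_block_alt (lines : List String) : List Int :=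
  match lines with
  | [] => []
  | l :: rest =>
    if pvNonBlank l then
      (((l :: rest).takeWhile pvNonBlank).length : Int) ::
        count_lines_per_block_alt ((l :: rest).dropWhile pvNonBlank)
    else
      count_lines_per_block_alt rest
termination_by lines.length
decreasing_by
  · simp only [List.dropWhile_cons, *, if_pos, List.length_cons]
    exact Nat.lt_succ_of_le (List.length_dropWhile_le _ _)
  · simp

-- ===== PRECONDITION & SPEC =====
def Spec_count_lines_per_block (lines : List String) (out : List Int) : Prop := out = count_lines_per_block_alt lines
instance (lines : List String) (out : List Int) : Decidable (Spec_count_lines_per_block lines out) := by unfold Spec_count_lines_per_block; infer_instance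

-- ===== CLAIM (what is proved, stated in full; the proofs are below) =====
def Claim_equal_count_lines_per_block : Prop := ∀ (lines : List String), Dom_count_lines_per_block lines → Spec_count_lines_per_block lines (count_lines_per_block lines)

-- ===== LEMMAS AND PROOFS =====

lemma countA_go_append (lines : List String) :
    ∀ (acc : List Int) (cur : Int), countA_go acc cur lines = acc ++ countA_go [] cur lines := by
  induction lines with
  | nil => intro acc cur; by_cases h : cur > 0 <;> simp [countA_go, h]
  | cons l rest ih =>
    intro acc cur
    by_cases h : pvNonBlank l
    · rw [countA_go, countA_go, if_pos h, if_pos h, ih acc (cur + 1)]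
    · by_cases hc : cur > 0
      · rw [countA_go, countA_go, if_neg h, if_neg h, if_pos hc, if_pos hc,
          ih (acc ++ [cur]) 0, ih ([] ++ [cur]) 0]
        simp [List.append_assoc]
      · rw [countA_go, countA_go, if_neg h, if_neg h, if_neg hc, if_neg hc]
        exact ih acc cur

-- unfolding equations for B's port
lemma alt_cons_pos (l : String) (rest : List String) (h : pvNonBlank l = true) :
    count_lines_per_block_alt (l :: rest)
      = (((l :: rest).takeWhile pvNonBlank).length : Int) ::
          count_lines_per_block_alt ((l :: rest).dropWhile pvNonBlank) := by
  conv_lhs => rw [count_lines_per_block_alt]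
  rw [if_pos h]

lemma alt_cons_neg (l : String) (rest : List String) (h : pvNonBlank l = false) :
    count_lines_per_block_alt (l :: rest) = count_lines_per_block_alt rest := by
  conv_lhs => rw [count_lines_per_block_alt]
  rw [if_neg (by simp [h])]

-- B's characteristic equation in takeWhile/dropWhile form
lemma alt_eq (lines : List String) :
    (if 0 < (lines.takeWhile pvNonBlank).length
      then ((lines.takeWhile pvNonBlank).length : Int) ::
            count_lines_per_block_alt (lines.dropWhile pvNonBlank)
      else count_lines_per_block_alt (lines.dropWhile pvNonBlank))
    = count_lines_per_block_alt lines := by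
  match lines with
  | [] => simp [count_lines_per_block_alt]
  | l :: rest =>
    by_cases h : pvNonBlank l
    · have hTW : (l :: rest).takeWhile pvNonBlank = l :: rest.takeWhile pvNonBlank := by
        rw [List.takeWhile_cons, if_pos h]
      rw [alt_cons_pos l rest h, hTW, if_pos (by simp)]
    · have hb : pvNonBlank l = false := by simpa using h
      have hTW : (l :: rest).takeWhile pvNonBlank = [] := by
        rw [List.takeWhile_cons, if_neg (by simp [hb])]
      have hDW : (l :: rest).dropWhile pvNonBlank = l :: rest := by
        rw [List.dropWhile_cons, if_neg (by simp [hb])]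
      rw [hTW, hDW, if_neg (by simp), alt_cons_neg l rest hb]

lemma countA_go_alt (lines : List String) :
    ∀ (cur : Int), 0 ≤ cur →
    countA_go [] cur lines =
      (if 0 < cur + ((lines.takeWhile pvNonBlank).length : Int)
        then (cur + ((lines.takeWhile pvNonBlank).length : Int)) ::
              count_lines_per_block_alt (lines.dropWhile pvNonBlank)
        else count_lines_per_block_alt (lines.dropWhile pvNonBlank)) := by
  induction lines with
  | nil =>
    intro cur _
    by_cases h : cur > 0 <;> simp [countA_go, count_lines_per_block_alt, h]
  | cons l rest ih =>
    intro cur hcur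
    by_cases h : pvNonBlank l
    · have hTW : (l :: rest).takeWhile pvNonBlank = l :: rest.takeWhile pvNonBlank := by
        rw [List.takeWhile_cons, if_pos h]
      have hDW : (l :: rest).dropWhile pvNonBlank = rest.dropWhile pvNonBlank := by
        rw [List.dropWhile_cons, if_pos h]
      rw [countA_go, if_pos h, ih (cur + 1) (by omega), hTW, hDW, List.length_cons]
      have harith : cur + 1 + ((rest.takeWhile pvNonBlank).length : Int)
          = cur + ((rest.takeWhile pvNonBlank).length + 1 : Nat) := by push_cast; ring
      rw [harith]
    · have hb : pvNonBlank l = false := by simpa using h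
      have hTW : (l :: rest).takeWhile pvNonBlank = [] := by
        rw [List.takeWhile_cons, if_neg (by simp [hb])]
      have hDW : (l :: rest).dropWhile pvNonBlank = l :: rest := by
        rw [List.dropWhile_cons, if_neg (by simp [hb])]
      have hrest : countA_go [] 0 rest = count_lines_per_block_alt rest := by
        rw [ih 0 le_rfl, ← alt_eq rest]
        simp only [zero_add, Int.natCast_pos]
      rw [countA_go, if_neg (by simp [hb]), hTW, hDW, alt_cons_neg l rest hb]
      simp only [List.length_nil, Nat.cast_zero, add_zero]
      by_cases hc : cur > 0
      · rw [if_pos hc, if_pos hc]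
        simp only [List.nil_append]
        rw [countA_go_append rest [cur] 0, hrest]
        rfl
      · have hz : cur = 0 := by omega
        rw [if_neg hc, if_neg hc, hz]
        exact hrest

-- ===== VERDICT (by name: the statement is the Claim_ definition above) =====
theorem count_lines_per_block_spec : Claim_equal_count_lines_per_block := by
  intro lines _
  show count_lines_per_block lines = count_lines_per_block_alt lines
  rw [count_lines_per_block, countA_go_alt lines 0 le_rfl, ← alt_eq lines]
  simp only [zero_add, Int.natCast_pos]
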